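-- pv_equiv track=rewrite | github.com/Blackscotch/PyRepo | les8/les8.py | FindMinMaxIndex
-- ===== SOURCE A (Python) =====
-- def FindMinMaxIndex(days, interval):
--     min = max = sum(days[0:interval])
--     min_index = 0
--     max_index = 0
--     for i in range(len(days) - interval + 1):
--         if max < sum(days[i:i+interval]):
--             max = sum(days[i:i+interval])
--             max_index = i
--         if min > sum(days[i:i+interval]):
--             min = sum(days[i:i+interval])
--             min_index = i
--     return [max_index, min_index]
-- ===== SOURCE B (Python) =====
-- def FindMinMaxIndex(days, interval):
--     # prefix sums: each window sum is one subtraction instead of re-summing a slice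
--     prefix = [0]
--     acc = 0
--     for d in days:
--         acc += d
--         prefix.append(acc)
--     best_max = best_min = None
--     max_i = min_i = 0
--     for i in range(len(days) - interval + 1):
--         s = prefix[i + interval] - prefix[i]
--         if best_max is None or s > best_max:
--             best_max, max_i = s, i
--         if best_min is None or s < best_min:
--             best_min, min_i = s, i
--     return [max_i, min_i]
-- ===== Notes on version B (the rewrite author's own statement) =====
-- stated objective: faster
-- what changed: B builds a prefix-sum array once and gets each window sum as one subtraction (None-initialized running argmax/argmin) instead of A's re-summing the slice three times per index; Pre_ excludes negative interval, where A's value is an accident of Python's negative-slice wraparound and B's prefix indexing raises IndexError.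
-- outside the precondition, e.g. on FindMinMaxIndex([1, 2, 3], -1): A returns [0, 1], B raises IndexError
import Mathlib
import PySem

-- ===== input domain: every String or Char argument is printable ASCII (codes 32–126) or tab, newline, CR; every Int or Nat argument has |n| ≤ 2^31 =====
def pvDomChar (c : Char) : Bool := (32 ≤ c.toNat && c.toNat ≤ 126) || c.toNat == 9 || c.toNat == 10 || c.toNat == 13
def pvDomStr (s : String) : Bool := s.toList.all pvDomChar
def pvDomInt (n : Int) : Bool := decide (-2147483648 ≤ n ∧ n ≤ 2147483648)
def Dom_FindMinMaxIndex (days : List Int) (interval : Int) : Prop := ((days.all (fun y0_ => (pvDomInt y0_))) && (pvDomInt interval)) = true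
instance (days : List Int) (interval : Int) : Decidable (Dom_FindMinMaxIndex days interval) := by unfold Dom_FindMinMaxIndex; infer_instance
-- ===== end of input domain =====

-- B replaces A's per-window slice re-summation by a one-pass prefix-sum array with a None-initialized argmax/argmin; return value proved identical for 0 ≤ interval.

-- ===== PORT A =====
-- state = (min, max, min_index, max_index), in Python declaration order
def FindMinMaxIndex (days : List Int) (interval : Int) : List Int :=
  let init := (PySem.List.slice days (some 0) (some interval)).sum
  let st := (PySem.List.pyRange 0 ((days.length : Int) - interval + 1) 1).foldl
    (fun (st : Int × Int × Int × Int) i =>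
      let s := (PySem.List.slice days (some i) (some (i + interval))).sum
      let mx2 := if st.2.1 < s then s else st.2.1
      let mxi2 := if st.2.1 < s then i else st.2.2.2
      let mn2 := if st.1 > s then s else st.1
      let mni2 := if st.1 > s then i else st.2.2.1
      (mn2, mx2, mni2, mxi2))
    (init, init, 0, 0)
  [st.2.2.2, st.2.2.1]

-- ===== PORT B =====
-- Source B's prefix loop: running total appended once per element
def pvPref (acc : Int) : List Int → List Int
  | [] => [acc]
  | d :: ds => acc :: pvPref (acc + d) ds

-- state = (best_max, best_min, max_i, min_i), in Source B declaration order;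
-- 'best is None or s > best' is Option.elim true (s > ·)
def FindMinMaxIndex_alt (days : List Int) (interval : Int) : List Int :=
  let P := pvPref 0 days
  let st := (PySem.List.pyRange 0 ((days.length : Int) - interval + 1) 1).foldl
    (fun (st : Option Int × Option Int × Int × Int) i =>
      let s := PySem.List.pyGetD P (i + interval) 0 - PySem.List.pyGetD P i 0
      let cmax : Bool := st.1.elim true (fun v => decide (s > v))
      let cmin : Bool := st.2.1.elim true (fun v => decide (s < v))
      (if cmax then some s else st.1, if cmin then some s else st.2.1,
       if cmax then i else st.2.2.1, if cmin then i else st.2.2.2))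
    (none, none, 0, 0)
  [st.2.2.1, st.2.2.2]

-- ===== PRECONDITION & SPEC =====
-- Pre_ excludes interval < 0: there A's value is an accident of Python's negative-slice
-- clamping/wraparound, and B's prefix indexing raises IndexError.
def Pre_FindMinMaxIndex (days : List Int) (interval : Int) : Prop := 0 ≤ interval
instance (days : List Int) (interval : Int) : Decidable (Pre_FindMinMaxIndex days interval) := by
  unfold Pre_FindMinMaxIndex; infer_instance
def pvWitness_FindMinMaxIndex : List Int × Int := ([5, 1, 9, 2, 3], 2)

def Spec_FindMinMaxIndex (days : List Int) (interval : Int) (out : List Int) : Prop := out = FindMinMaxIndex_alt days interval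
instance (days : List Int) (interval : Int) (out : List Int) : Decidable (Spec_FindMinMaxIndex days interval out) := by unfold Spec_FindMinMaxIndex; infer_instance

-- ===== CLAIM (what is proved, stated in full; the proofs are below) =====
def Claim_equal_FindMinMaxIndex : Prop := ∀ (days : List Int) (interval : Int), Dom_FindMinMaxIndex days interval → Pre_FindMinMaxIndex days interval → Spec_FindMinMaxIndex days interval (FindMinMaxIndex days interval)

-- ===== LEMMAS AND PROOFS =====

theorem pv_sum_drop_take (xs : List Int) (l k : Nat) :
    ((xs.drop l).take k).sum = (xs.take (l + k)).sum - (xs.take l).sum := by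
  rw [List.take_add, List.sum_append]; ring

theorem pvPref_getD (xs : List Int) (a : Int) (k : Nat) (hk : k ≤ xs.length) :
    (pvPref a xs).getD k 0 = a + (xs.take k).sum := by
  induction xs generalizing a k with
  | nil =>
      have : k = 0 := Nat.le_zero.mp (by simpa using hk)
      subst this; simp [pvPref]
  | cons d ds ih =>
      cases k with
      | zero => simp [pvPref]
      | succ k =>
          simp only [pvPref, List.getD_cons_succ, List.take_succ_cons, List.sum_cons]
          rw [ih (a + d) k (by simpa using hk)]; ring

-- B's prefix read at a nonnegative in-range index is the take-sum
theorem pv_pyGetD_pref (xs : List Int) (j : Int) (h0 : 0 ≤ j) (h1 : j ≤ (xs.length : Int)) :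
    PySem.List.pyGetD (pvPref 0 xs) j 0 = (xs.take j.toNat).sum := by
  obtain ⟨k, rfl⟩ : ∃ k : Nat, j = (k : Int) := ⟨j.toNat, (Int.toNat_of_nonneg h0).symm⟩
  rw [PySem.List.pyGetD_natCast, pvPref_getD xs 0 k (by exact_mod_cast h1)]
  simp

-- A's slice sum equals B's prefix-difference window sum (in-range window)
theorem pv_window (xs : List Int) (interval i : Int) (h0 : 0 ≤ i) (h1 : 0 ≤ interval)
    (h2 : i + interval ≤ (xs.length : Int)) :
    (PySem.List.slice xs (some i) (some (i + interval))).sum =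
      PySem.List.pyGetD (pvPref 0 xs) (i + interval) 0 - PySem.List.pyGetD (pvPref 0 xs) i 0 := by
  rw [PySem.List.slice_toNat xs h0 (by omega), pv_sum_drop_take,
      pv_pyGetD_pref xs (i + interval) (by omega) h2, pv_pyGetD_pref xs i h0 (by omega)]
  have : (i + interval).toNat = i.toNat + ((i + interval).toNat - i.toNat) := by omega
  rw [← this]

-- ===== VERDICT (by name: the statement is the Claim_ definition above) =====
theorem FindMinMaxIndex_spec : Claim_equal_FindMinMaxIndex := by
  intro days interval _ hpre
  unfold Pre_FindMinMaxIndex at hpre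
  unfold Spec_FindMinMaxIndex FindMinMaxIndex FindMinMaxIndex_alt
  by_cases hm : (days.length : Int) - interval + 1 ≤ 0
  · rw [PySem.List.pyRange_one_eq_nil hm]; rfl
  · have hiv : interval ≤ (days.length : Int) := by omega
    rw [PySem.List.pyRange_one_cons (by omega)]
    have hinit : (PySem.List.slice days (some 0) (some interval)).sum
        = PySem.List.pyGetD (pvPref 0 days) (0 + interval) 0 - PySem.List.pyGetD (pvPref 0 days) 0 0 := by
      have := pv_window days interval 0 le_rfl hpre (by omega)
      simpa using this
    simp only [List.foldl_cons, zero_add, Option.elim_none, Option.elim_some, if_true,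
      eq_self_iff_true, lt_irrefl, if_false, gt_iff_lt, hinit]
    -- key: B's fold state is always (some max, some min, max_i, min_i) of A's (min, max, min_i, max_i)
    have key : ∀ (L : List Int), (∀ x ∈ L, 0 ≤ x ∧ x + interval ≤ (days.length : Int)) →
        ∀ a b c d : Int,
        L.foldl (fun (st : Option Int × Option Int × Int × Int) i =>
          (if st.1.elim true (fun v => decide (v < (PySem.List.pyGetD (pvPref 0 days) (i + interval) 0 - PySem.List.pyGetD (pvPref 0 days) i 0))) = true then
              some (PySem.List.pyGetD (pvPref 0 days) (i + interval) 0 - PySem.List.pyGetD (pvPref 0 days) i 0) else st.1,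
           if st.2.1.elim true (fun v => decide ((PySem.List.pyGetD (pvPref 0 days) (i + interval) 0 - PySem.List.pyGetD (pvPref 0 days) i 0) < v)) = true then
              some (PySem.List.pyGetD (pvPref 0 days) (i + interval) 0 - PySem.List.pyGetD (pvPref 0 days) i 0) else st.2.1,
           if st.1.elim true (fun v => decide (v < (PySem.List.pyGetD (pvPref 0 days) (i + interval) 0 - PySem.List.pyGetD (pvPref 0 days) i 0))) = true then i else st.2.2.1,
           if st.2.1.elim true (fun v => decide ((PySem.List.pyGetD (pvPref 0 days) (i + interval) 0 - PySem.List.pyGetD (pvPref 0 days) i 0) < v)) = true then i else st.2.2.2))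
          (some b, some a, d, c)
        = (some ((L.foldl (fun (st : Int × Int × Int × Int) i =>
            (if (PySem.List.slice days (some i) (some (i + interval))).sum < st.1 then
                (PySem.List.slice days (some i) (some (i + interval))).sum else st.1,
             if st.2.1 < (PySem.List.slice days (some i) (some (i + interval))).sum then
                (PySem.List.slice days (some i) (some (i + interval))).sum else st.2.1,
             if (PySem.List.slice days (some i) (some (i + interval))).sum < st.1 then i else st.2.2.1,
             if st.2.1 < (PySem.List.slice days (some i) (some (i + interval))).sum then i else st.2.2.2))
            (a, b, c, d)).2.1),
           some ((L.foldl (fun (st : Int × Int × Int × Int) i =>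
            (if (PySem.List.slice days (some i) (some (i + interval))).sum < st.1 then
                (PySem.List.slice days (some i) (some (i + interval))).sum else st.1,
             if st.2.1 < (PySem.List.slice days (some i) (some (i + interval))).sum then
                (PySem.List.slice days (some i) (some (i + interval))).sum else st.2.1,
             if (PySem.List.slice days (some i) (some (i + interval))).sum < st.1 then i else st.2.2.1,
             if st.2.1 < (PySem.List.slice days (some i) (some (i + interval))).sum then i else st.2.2.2))
            (a, b, c, d)).1),
           ((L.foldl (fun (st : Int × Int × Int × Int) i =>
            (if (PySem.List.slice days (some i) (some (i + interval))).sum < st.1 then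
                (PySem.List.slice days (some i) (some (i + interval))).sum else st.1,
             if st.2.1 < (PySem.List.slice days (some i) (some (i + interval))).sum then
                (PySem.List.slice days (some i) (some (i + interval))).sum else st.2.1,
             if (PySem.List.slice days (some i) (some (i + interval))).sum < st.1 then i else st.2.2.1,
             if st.2.1 < (PySem.List.slice days (some i) (some (i + interval))).sum then i else st.2.2.2))
            (a, b, c, d)).2.2.2),
           ((L.foldl (fun (st : Int × Int × Int × Int) i =>
            (if (PySem.List.slice days (some i) (some (i + interval))).sum < st.1 then
                (PySem.List.slice days (some i) (some (i + interval))).sum else st.1,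
             if st.2.1 < (PySem.List.slice days (some i) (some (i + interval))).sum then
                (PySem.List.slice days (some i) (some (i + interval))).sum else st.2.1,
             if (PySem.List.slice days (some i) (some (i + interval))).sum < st.1 then i else st.2.2.1,
             if st.2.1 < (PySem.List.slice days (some i) (some (i + interval))).sum then i else st.2.2.2))
            (a, b, c, d)).2.2.1)) := by
      intro L
      induction L with
      | nil => intro _ a b c d; rfl
      | cons x L ih =>
          intro hmem a b c d
          obtain ⟨⟨hx0, hx1⟩, hL⟩ := List.forall_mem_cons.mp hmem
          simp only [List.foldl_cons, Option.elim_some, decide_eq_true_eq,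
            pv_window days interval x hx0 hpre hx1, ← apply_ite (some : Int → Option Int)]
          exact ih hL _ _ _ _
    rw [key (PySem.List.pyRange 1 ((days.length : Int) - interval + 1) 1)
        (by intro x hx; have := (PySem.List.mem_pyRange_one).mp hx; omega)]
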